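-- pv_equiv track=rewrite | github.com/jcolinpatrick/kryptos | scripts/e_chart_07_width9_cc.py | read_diagonal
-- ===== SOURCE A (Python) =====
-- def read_diagonal(grid, width, nrows):
--     """Read grid in diagonal order."""
--     result = []
--     for d in range(width + nrows - 1):
--         for r in range(nrows):
--             c = d - r
--             if 0 <= c < width and r < len(grid) and c < len(grid[r]):
--                 result.append(grid[r][c])
--     return ''.join(result)
-- ===== SOURCE B (Python) =====
-- def read_diagonal(grid, width, nrows):
--     """Read grid in diagonal order (scatter cells into per-diagonal buckets)."""
--     nr = min(nrows, len(grid))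
--     buckets = [[] for _ in range(max(nr + width - 1, 0))]
--     for r in range(nr):
--         row = grid[r]
--         for c in range(min(width, len(row))):
--             buckets[r + c].append(row[c])
--     return ''.join(''.join(b) for b in buckets)
-- ===== Notes on version B (the rewrite author's own statement) =====
-- stated objective: faster
-- what changed: Instead of rescanning every row for each diagonal, B makes one pass over the grid cells, scattering each into a per-diagonal bucket list, then joins the buckets in order.
import Mathlib
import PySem

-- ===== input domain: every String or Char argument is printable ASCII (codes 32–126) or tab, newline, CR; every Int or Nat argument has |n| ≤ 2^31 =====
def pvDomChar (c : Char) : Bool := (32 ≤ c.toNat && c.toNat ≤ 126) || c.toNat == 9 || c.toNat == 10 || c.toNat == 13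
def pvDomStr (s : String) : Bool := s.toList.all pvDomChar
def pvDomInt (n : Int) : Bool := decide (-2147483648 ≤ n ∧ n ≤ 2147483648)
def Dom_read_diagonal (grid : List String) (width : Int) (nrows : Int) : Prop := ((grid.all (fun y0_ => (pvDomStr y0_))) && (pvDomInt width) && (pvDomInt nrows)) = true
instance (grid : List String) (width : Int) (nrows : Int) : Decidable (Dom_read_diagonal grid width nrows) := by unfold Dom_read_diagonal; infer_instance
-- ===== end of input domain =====

-- B scatters each cell once into per-diagonal buckets and joins them, instead of A's
-- rescan of all rows for every diagonal (objective: a different, single-pass decomposition).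

-- ===== PORT A =====
-- literal port of A: for d in range(width+nrows-1): for r in range(nrows): guarded append
def read_diagonal (grid : List String) (width : Int) (nrows : Int) : String :=
  let result : List Char :=
    (PySem.List.pyRange 0 (width + nrows - 1) 1).foldl (fun result d =>
      (PySem.List.pyRange 0 nrows 1).foldl (fun result r =>
        let c := d - r
        if 0 ≤ c ∧ c < width ∧ r < (grid.length : Int) ∧
            c < (((PySem.List.pyGetD grid r "").toList.length : Int)) then
          result ++ [PySem.List.pyGetD (PySem.List.pyGetD grid r "").toList c ' ']
        else result) result) ([] : List Char)
  String.mk result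

-- ===== PORT B =====
-- literal port of Source B: buckets indexed by diagonal, one pass over the cells, then join
def read_diagonal_alt (grid : List String) (width : Int) (nrows : Int) : String :=
  let nr := min nrows (grid.length : Int)
  let buckets0 : List (List Char) := List.replicate (max (nr + width - 1) 0).toNat []
  let buckets :=
    (PySem.List.pyRange 0 nr 1).foldl (fun buckets r =>
      let row := (PySem.List.pyGetD grid r "").toList
      (PySem.List.pyRange 0 (min width (row.length : Int)) 1).foldl (fun buckets c =>
        buckets.modify (r + c).toNat (fun b => b ++ [PySem.List.pyGetD row c ' '])) buckets)
      buckets0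
  String.mk (buckets.flatMap id)

-- ===== PRECONDITION & SPEC =====
def Spec_read_diagonal (grid : List String) (width : Int) (nrows : Int) (out : String) : Prop := out = read_diagonal_alt grid width nrows
instance (grid : List String) (width : Int) (nrows : Int) (out : String) : Decidable (Spec_read_diagonal grid width nrows out) := by unfold Spec_read_diagonal; infer_instance

-- ===== CLAIM (what is proved, stated in full; the proofs are below) =====
def Claim_equal_read_diagonal : Prop := ∀ (grid : List String) (width : Int) (nrows : Int), Dom_read_diagonal grid width nrows → Spec_read_diagonal grid width nrows (read_diagonal grid width nrows)

-- ===== LEMMAS AND PROOFS =====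

-- row rn of the grid as chars
def rowOf (grid : List String) (rn : Nat) : List Char := (grid.getD rn "").toList

-- effective width of row rn in B's inner loop
def wOf (grid : List String) (width : Int) (rn : Nat) : Nat :=
  (min width ((rowOf grid rn).length : Int)).toNat

-- the (at most one) char row rn contributes to diagonal dn, given bound wn
def contribN (row : List Char) (rn wn dn : Nat) : List Char :=
  if rn ≤ dn ∧ dn - rn < wn then [row.getD (dn - rn) ' '] else []

-- all chars on diagonal dn, rows 0..m-1 in order
def diagN (grid : List String) (width : Int) (m dn : Nat) : List Char :=
  (List.range m).flatMap (fun rn => contribN (rowOf grid rn) rn (wOf grid width rn) dn)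

lemma foldl_app {α β : Type} (g : α → List β) :
    ∀ (xs : List α) (init : List β),
      xs.foldl (fun acc x => acc ++ g x) init = init ++ xs.flatMap g := by
  intro xs
  induction xs with
  | nil => intro init; simp
  | cons x xs ih => intro init; simp [ih]

lemma flatMap_congr_mem {α β : Type} {l : List α} {f g : α → List β}
    (h : ∀ a ∈ l, f a = g a) : l.flatMap f = l.flatMap g := by
  induction l with
  | nil => rfl
  | cons x xs ih =>
    simp only [List.flatMap_cons]
    rw [h x (by simp), ih (fun a ha => h a (by simp [ha]))]

-- A's guarded cell as a list
def cellA (grid : List String) (width : Int) (r c : Int) : List Char :=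
  if 0 ≤ c ∧ c < width ∧ r < (grid.length : Int) ∧
      c < (((PySem.List.pyGetD grid r "").toList.length : Int)) then
    [PySem.List.pyGetD (PySem.List.pyGetD grid r "").toList c ' ']
  else []

lemma readA_flatMap (grid : List String) (width nrows : Int) :
    read_diagonal grid width nrows =
      String.mk ((PySem.List.pyRange 0 (width + nrows - 1) 1).flatMap (fun d =>
        (PySem.List.pyRange 0 nrows 1).flatMap (fun r => cellA grid width r (d - r)))) := by
  unfold read_diagonal
  have hin : ∀ (d : Int) (res : List Char),
      (PySem.List.pyRange 0 nrows 1).foldl (fun result r =>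
        let c := d - r
        if 0 ≤ c ∧ c < width ∧ r < (grid.length : Int) ∧
            c < (((PySem.List.pyGetD grid r "").toList.length : Int)) then
          result ++ [PySem.List.pyGetD (PySem.List.pyGetD grid r "").toList c ' ']
        else result) res
      = res ++ (PySem.List.pyRange 0 nrows 1).flatMap (fun r => cellA grid width r (d - r)) := by
    intro d res
    have hf : (fun (result : List Char) (r : Int) =>
        let c := d - r
        if 0 ≤ c ∧ c < width ∧ r < (grid.length : Int) ∧
            c < (((PySem.List.pyGetD grid r "").toList.length : Int)) then
          result ++ [PySem.List.pyGetD (PySem.List.pyGetD grid r "").toList c ' ']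
        else result)
        = (fun result r => result ++ cellA grid width r (d - r)) := by
      funext result r
      simp only [cellA]
      split_ifs <;> simp
    rw [hf, foldl_app]
  simp only [hin]
  rw [foldl_app]
  simp

-- A's cell agrees with contribN on in-grid rows
lemma cellA_eq_contribN (grid : List String) (width : Int) (rn dn : Nat)
    (hr : rn < grid.length) :
    cellA grid width (rn : Int) ((dn : Int) - (rn : Int)) =
      contribN (rowOf grid rn) rn (wOf grid width rn) dn := by
  have hrow : PySem.List.pyGetD grid ((rn : Nat) : Int) "" = grid.getD rn "" :=
    PySem.List.pyGetD_natCast grid rn ""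
  unfold cellA contribN wOf rowOf
  rw [hrow]
  by_cases h : rn ≤ dn ∧ dn - rn < (min width ((grid.getD rn "").toList.length : Int)).toNat
  · have hcast : ((dn : Int) - (rn : Int)) = ((dn - rn : Nat) : Int) := by omega
    have hcond : (0 : Int) ≤ (dn : Int) - rn ∧ (dn : Int) - rn < width ∧
        (rn : Int) < (grid.length : Int) ∧
        (dn : Int) - rn < ((grid.getD rn "").toList.length : Int) := by
      refine ⟨by omega, by omega, by exact_mod_cast hr, by omega⟩
    rw [if_pos hcond, if_pos h, hcast, PySem.List.pyGetD_natCast]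
  · rw [if_neg ?_, if_neg h]
    intro hc
    exact h ⟨by omega, by omega⟩

-- rows at or beyond the grid contribute nothing in A
lemma cellA_out (grid : List String) (width : Int) (r c : Int)
    (hr : (grid.length : Int) ≤ r) : cellA grid width r c = [] := by
  unfold cellA
  rw [if_neg]
  intro hc
  omega

-- diagonals at or beyond max(nr+width-1,0) are empty
lemma diagN_out (grid : List String) (width nrows : Int) (dn : Nat)
    (hd : (max (min nrows (grid.length : Int) + width - 1) 0).toNat ≤ dn) :
    diagN grid width (min nrows (grid.length : Int)).toNat dn = [] := by
  unfold diagN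
  apply List.flatMap_eq_nil_iff.mpr
  intro rn hrn
  rw [List.mem_range] at hrn
  unfold contribN
  rw [if_neg]
  rintro ⟨h1, h2⟩
  unfold wOf rowOf at h2
  omega


-- drop trailing range elements whose image is empty
lemma flatMap_range_trunc {β : Type} (f : Nat → List β) (K : Nat) :
    ∀ (M : Nat), K ≤ M → (∀ dn, K ≤ dn → dn < M → f dn = []) →
      (List.range M).flatMap f = (List.range K).flatMap f := by
  intro M
  induction M with
  | zero => intro hKM _; have : K = 0 := by omega
            rw [this]
  | succ M ih =>
    intro hKM h
    by_cases hK : K ≤ M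
    · rw [List.range_succ, List.flatMap_append]
      simp only [List.flatMap_cons, List.flatMap_nil, List.append_nil]
      rw [h M (by omega) (by omega), List.append_nil]
      exact ih hK (fun dn h1 h2 => h dn h1 (by omega))
    · have : K = M + 1 := by omega
      rw [this]

-- the A-side inner flatMap equals diagN over min(nrows, len(grid)) rows
lemma adiag_eq_diagN (grid : List String) (width nrows : Int) (dn : Nat) :
    (PySem.List.pyRange 0 nrows 1).flatMap (fun r => cellA grid width r ((dn : Int) - r))
      = diagN grid width (min nrows (grid.length : Int)).toNat dn := by
  rw [PySem.List.pyRange_one, List.flatMap_map]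
  simp only [zero_add]
  have hsub : (nrows - 0).toNat = nrows.toNat := by omega
  rw [hsub]
  rw [flatMap_range_trunc (fun a : Nat => cellA grid width (a : Int) ((dn : Int) - (a : Int)))
      (min nrows (grid.length : Int)).toNat nrows.toNat (by omega) ?_]
  · unfold diagN
    apply flatMap_congr_mem
    intro rn hrn
    rw [List.mem_range] at hrn
    exact cellA_eq_contribN grid width rn dn (by omega)
  · intro rn h1 h2
    apply cellA_out
    omega

-- ===== B side =====

-- inner loop: scatter one row into the buckets
lemma scatter_row (row : List Char) (rn : Nat) :
    ∀ (wn : Nat) (bs : List (List Char)),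
      (List.range wn).foldl (fun bs cn =>
          bs.modify (rn + cn) (fun b => b ++ [row.getD cn ' '])) bs
        = bs.mapIdx (fun dn b => b ++ contribN row rn wn dn) := by
  intro wn
  induction wn with
  | zero =>
    intro bs
    simp only [List.range_zero, List.foldl_nil]
    apply List.ext_getElem (by simp)
    intro j h1 h2
    simp [contribN]
  | succ wn ih =>
    intro bs
    rw [List.range_succ, List.foldl_append, ih]
    simp only [List.foldl_cons, List.foldl_nil]
    apply List.ext_getElem (by simp)
    intro j h1 h2
    rw [List.getElem_modify]
    simp only [List.getElem_mapIdx]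
    by_cases hj : rn + wn = j
    · subst hj
      rw [if_pos rfl]
      unfold contribN
      rw [if_neg (by omega), if_pos ⟨by omega, by omega⟩]
      simp
    · rw [if_neg hj]
      unfold contribN
      by_cases hc : rn ≤ j ∧ j - rn < wn
      · rw [if_pos hc, if_pos ⟨hc.1, by omega⟩]
      · rw [if_neg hc, if_neg (by omega)]

-- outer loop: scatter the first m rows
lemma scatter_rows (grid : List String) (width : Int) :
    ∀ (m : Nat) (bs : List (List Char)),
      (List.range m).foldl (fun bs rn =>
          (List.range (wOf grid width rn)).foldl (fun bs cn =>
            bs.modify (rn + cn) (fun b => b ++ [(rowOf grid rn).getD cn ' '])) bs) bs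
        = bs.mapIdx (fun dn b => b ++ diagN grid width m dn) := by
  intro m
  induction m with
  | zero =>
    intro bs
    simp only [List.range_zero, List.foldl_nil]
    apply List.ext_getElem (by simp)
    intro j h1 h2
    simp [diagN]
  | succ m ih =>
    intro bs
    rw [List.range_succ, List.foldl_append, ih]
    simp only [List.foldl_cons, List.foldl_nil]
    rw [scatter_row]
    apply List.ext_getElem (by simp)
    intro j h1 h2
    simp [List.getElem_mapIdx, diagN, List.range_succ, List.append_assoc]

-- B's result in canonical form
lemma readB_canonical (grid : List String) (width nrows : Int) :
    read_diagonal_alt grid width nrows =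
      String.mk ((List.range (max (min nrows (grid.length : Int) + width - 1) 0).toNat).flatMap
        (fun dn => diagN grid width (min nrows (grid.length : Int)).toNat dn)) := by
  show String.mk ((((PySem.List.pyRange 0 (min nrows (grid.length : Int)) 1).foldl
      (fun buckets r =>
        (PySem.List.pyRange 0 (min width (((PySem.List.pyGetD grid r "").toList.length : Int))) 1).foldl
          (fun buckets c =>
            buckets.modify (r + c).toNat
              (fun b => b ++ [PySem.List.pyGetD (PySem.List.pyGetD grid r "").toList c ' ']))
          buckets)
      (List.replicate (max (min nrows (grid.length : Int) + width - 1) 0).toNat []))).flatMap id)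
    = _
  rw [PySem.List.pyRange_one, List.foldl_map]
  have hstep : (fun (buckets : List (List Char)) (rn : Nat) =>
      (fun (buckets : List (List Char)) (r : Int) =>
        (PySem.List.pyRange 0 (min width (((PySem.List.pyGetD grid r "").toList.length : Int))) 1).foldl
          (fun buckets c =>
            buckets.modify (r + c).toNat
              (fun b => b ++ [PySem.List.pyGetD (PySem.List.pyGetD grid r "").toList c ' ']))
          buckets)
        buckets ((0 : Int) + (rn : Nat)))
      = (fun bs rn =>
          (List.range (wOf grid width rn)).foldl (fun bs cn =>
            bs.modify (rn + cn) (fun b => b ++ [(rowOf grid rn).getD cn ' '])) bs) := by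
    funext bs rn
    simp only [zero_add]
    rw [PySem.List.pyGetD_natCast]
    rw [PySem.List.pyRange_one, List.foldl_map]
    have hw : (min width (((grid.getD rn "").toList.length : Nat) : Int) - 0).toNat
        = wOf grid width rn := by
      unfold wOf rowOf; omega
    rw [hw]
    congr 1
    funext bs cn
    simp only [zero_add]
    rw [PySem.List.pyGetD_natCast]
    have hidx : (((rn : Nat) : Int) + ((cn : Nat) : Int)).toNat = rn + cn := by omega
    rw [hidx]
    rfl
  rw [hstep, scatter_rows]
  have hsub : (min nrows (grid.length : Int) - 0).toNat = (min nrows (grid.length : Int)).toNat := by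
    omega
  rw [hsub]
  congr 1
  have hmap : (List.replicate (max (min nrows (grid.length : Int) + width - 1) 0).toNat
        ([] : List Char)).mapIdx
        (fun dn b => b ++ diagN grid width (min nrows (grid.length : Int)).toNat dn)
      = (List.range (max (min nrows (grid.length : Int) + width - 1) 0).toNat).map
        (fun dn => diagN grid width (min nrows (grid.length : Int)).toNat dn) := by
    apply List.ext_getElem (by simp)
    intro j h1 h2
    simp [List.getElem_mapIdx]
  rw [hmap, List.flatMap_map]
  simp

-- ===== VERDICT (by name: the statement is the Claim_ definition above) =====
theorem read_diagonal_spec : Claim_equal_read_diagonal := by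
  intro grid width nrows _
  unfold Spec_read_diagonal
  rw [readA_flatMap, readB_canonical]
  rw [PySem.List.pyRange_one 0 (width + nrows - 1), List.flatMap_map]
  simp only [zero_add]
  have hsub : (width + nrows - 1 - 0).toNat = (width + nrows - 1).toNat := by omega
  rw [hsub]
  rw [flatMap_range_trunc (fun a : Nat => (PySem.List.pyRange 0 nrows 1).flatMap
        (fun r => cellA grid width r ((a : Int) - r)))
      (max (min nrows (grid.length : Int) + width - 1) 0).toNat (width + nrows - 1).toNat
      (by omega) ?_]
  · congr 1
    apply flatMap_congr_mem
    intro dn _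
    exact adiag_eq_diagN grid width nrows dn
  · intro dn h1 _
    show (PySem.List.pyRange 0 nrows 1).flatMap (fun r => cellA grid width r ((dn : Int) - r)) = []
    rw [adiag_eq_diagN]
    exact diagN_out grid width nrows dn h1
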